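-- pv_equiv track=rewrite | github.com/Liamplussquared/codility-solutions | frog_river_one.py | solution
-- ===== SOURCE A (Python) =====
-- def solution(X, A):
--     positions = set()
--
--     for i in range(len(A)):
--         leaf = A[i]
--         positions.add(leaf)
--
--         if len(positions)==X:
--             return i
--
--     return -1
-- ===== SOURCE B (Python) =====
-- def solution(X, A):
--     # Build value -> first-occurrence index in one full pass, then select
--     # the (X-1)-th first-occurrence index (they appear in increasing order).
--     first = {}
--     for i, v in enumerate(A):
--         if v not in first:
--             first[v] = i
--     idxs = list(first.values())
--     if 1 <= X <= len(idxs):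
--         return idxs[X - 1]
--     return -1
-- ===== Notes on version B (the rewrite author's own statement) =====
-- stated objective: alternative
-- what changed: Replaces the early-terminating prefix scan maintaining a growing set with a single full pass building a value-to-first-index dict, then selecting the (X-1)-th first-occurrence index (first-occurrence indices come out in increasing scan order).
import Mathlib
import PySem

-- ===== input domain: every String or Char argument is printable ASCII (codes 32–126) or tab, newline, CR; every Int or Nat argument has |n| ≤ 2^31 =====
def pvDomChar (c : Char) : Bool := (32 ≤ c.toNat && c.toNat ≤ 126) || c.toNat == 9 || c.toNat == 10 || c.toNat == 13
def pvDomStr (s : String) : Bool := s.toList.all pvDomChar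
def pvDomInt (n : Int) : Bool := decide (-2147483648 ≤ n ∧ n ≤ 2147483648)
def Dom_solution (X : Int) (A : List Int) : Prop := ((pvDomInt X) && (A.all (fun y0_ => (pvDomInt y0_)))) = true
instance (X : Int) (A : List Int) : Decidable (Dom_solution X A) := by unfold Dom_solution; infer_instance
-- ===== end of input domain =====

-- B replaces A's early-terminating prefix scan over a growing set by a full pass
-- building a value→first-index dict and selecting the (X-1)-th first-occurrence index (alternative decomposition, same cost).


-- ===== PORT A =====
-- loop over A with running index i and the set `positions`; early return on len == X
def solGo (X : Int) (i : Int) (rest : List Int) (positions : PySem.Set Int) : Int :=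
  match rest with
  | [] => -1
  | leaf :: tl =>
    let positions := PySem.Set.add positions leaf
    if PySem.Set.len positions = X then i
    else solGo X (i + 1) tl positions

def solution (X : Int) (A : List Int) : Int :=
  solGo X 0 A PySem.Set.empty

-- ===== PORT B =====
-- full pass: first[v] = i only the first time v appears
def altFold (d : PySem.Dict Int Int) (i : Int) (rest : List Int) : PySem.Dict Int Int :=
  match rest with
  | [] => d
  | v :: tl => altFold (if d.contains v then d else d.insert v i) (i + 1) tl

def solution_alt (X : Int) (A : List Int) : Int :=
  let first := altFold PySem.Dict.empty 0 A
  let idxs := first.values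
  if 1 ≤ X ∧ X ≤ (idxs.length : Int) then (PySem.List.pyGet? idxs (X - 1)).getD (-1)
  else -1

-- ===== PRECONDITION & SPEC =====
def Spec_solution (X : Int) (A : List Int) (out : Int) : Prop := out = solution_alt X A
instance (X : Int) (A : List Int) (out : Int) : Decidable (Spec_solution X A out) := by unfold Spec_solution; infer_instance

-- ===== CLAIM (what is proved, stated in full; the proofs are below) =====
def Claim_equal_solution : Prop := ∀ (X : Int) (A : List Int), Dom_solution X A → Spec_solution X A (solution X A)

-- ===== LEMMAS AND PROOFS =====

-- altFold only appends items (never overwrites), so d.items is a prefix of the result's items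
lemma altFold_items_prefix (rest : List Int) : ∀ (d : PySem.Dict Int Int) (i : Int),
    ∃ extra, (altFold d i rest).items = d.items ++ extra := by
  induction rest with
  | nil => intro d i; exact ⟨[], by simp [altFold]⟩
  | cons v tl ih =>
    intro d i
    by_cases hc : d.contains v = true
    · obtain ⟨e, he⟩ := ih d (i + 1)
      exact ⟨e, by simp [altFold, hc, he]⟩
    · obtain ⟨e, he⟩ := ih (d.insert v i) (i + 1)
      refine ⟨(v, i) :: e, ?_⟩
      have hc' : d.contains v = false := by simp [hc]
      simp [altFold, hc', he, PySem.Dict.items_insert_of_not_contains d i hc']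

-- main invariant: set s and dict d describe the same prefix (same members,
-- |s| = number of stored indices), and no count in 1..|s| equals X (so A has not returned yet)
lemma key_lemma (X : Int) (rest : List Int) : ∀ (i : Int) (s : PySem.Set Int) (d : PySem.Dict Int Int),
    (∀ v, v ∈ s ↔ d.contains v = true) →
    d.values.length = s.length →
    ¬ (1 ≤ X ∧ X ≤ (s.length : Int)) →
    solGo X i rest s =
      (if 1 ≤ X ∧ X ≤ (((altFold d i rest).values.length : Nat) : Int) then
        (PySem.List.pyGet? (altFold d i rest).values (X - 1)).getD (-1)
      else -1) := by
  induction rest with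
  | nil =>
    intro i s d hmem hlen hX
    simp only [solGo, altFold]
    rw [if_neg]; rw [hlen]; exact hX
  | cons leaf tl ih =>
    intro i s d hmem hlen hX
    by_cases hin : leaf ∈ s
    · -- duplicate: set and dict unchanged
      have hc : d.contains leaf = true := (hmem leaf).1 hin
      have hslen : 1 ≤ s.length := List.length_pos_of_mem hin
      have hne : ((s.length : Nat) : Int) ≠ X := by
        intro h; exact hX ⟨by omega, le_of_eq h.symm⟩
      simp only [solGo, altFold, hc, if_true, PySem.Set.add_of_mem hin, PySem.Set.len]
      rw [if_neg hne]
      exact ih (i + 1) s d hmem hlen hX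
    · -- new value: both grow by one entry
      have hc : d.contains leaf = false := by
        cases h : d.contains leaf with
        | true => exact absurd ((hmem leaf).2 h) hin
        | false => rfl
      have hitems : (d.insert leaf i).items = d.items ++ [(leaf, i)] :=
        PySem.Dict.items_insert_of_not_contains d i hc
      have hvals : (d.insert leaf i).values = d.values ++ [i] := by
        simp [PySem.Dict.values, hitems]
      have hmem' : ∀ v, v ∈ s ++ [leaf] ↔ (d.insert leaf i).contains v = true := by
        intro v
        rw [PySem.Dict.contains_insert]
        simp only [List.mem_append, List.mem_singleton, Bool.or_eq_true, beq_iff_eq]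
        rw [hmem v]; tauto
      have hlen' : (d.insert leaf i).values.length = (s ++ [leaf]).length := by
        simp [hvals, hlen]
      simp only [solGo, altFold, hc, Bool.false_eq_true, if_false,
        PySem.Set.add_of_not_mem hin, PySem.Set.len, List.length_append,
        List.length_singleton]
      by_cases hXeq : ((s.length + 1 : Nat) : Int) = X
      · -- A returns i here; B's selected index is position |s| of the final values, which is i
        rw [if_pos (by simp; omega)]
        obtain ⟨extra, hext⟩ := altFold_items_prefix tl (d.insert leaf i) (i + 1)
        have hvext : (altFold (d.insert leaf i) (i + 1) tl).values
            = d.values ++ i :: extra.map Prod.snd := by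
          simp [PySem.Dict.values, hext, hitems]
        rw [if_pos]
        · have hXsub : X - 1 = ((d.values.length : Nat) : Int) := by
            rw [hlen]; omega
          rw [hXsub, hvext, PySem.List.pyGet?_natCast,
            List.getElem?_append_right (le_refl _)]
          simp
        · constructor
          · omega
          · rw [hvext]; simp; omega
      · rw [if_neg (fun h => hXeq h)]
        exact ih (i + 1) (s ++ [leaf]) (d.insert leaf i) hmem' hlen'
          (by simp only [List.length_append, List.length_singleton]; omega)

-- ===== VERDICT (by name: the statement is the Claim_ definition above) =====
theorem solution_spec : Claim_equal_solution := by
  intro X A _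
  unfold Spec_solution solution solution_alt
  exact key_lemma X A 0 PySem.Set.empty PySem.Dict.empty
    (by intro v; simp [PySem.Set.empty, PySem.Dict.contains_empty])
    (by simp [PySem.Set.empty, PySem.Dict.values, PySem.Dict.empty])
    (by simp [PySem.Set.empty]; omega)
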